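-- pv_equiv track=rewrite | github.com/ayushgupta-repo/MyDataStructureInPython | Problems/BeautifulString.py | makeBeautiful
-- ===== SOURCE A (Python) =====
-- def isBeautiful(str):
--     for i in range(len(str)-1):
--         if str[i] == str[i+1]:
--             return False
--     return True
--
-- def makeBeautiful(str):
-- 	# Write your code here
--
--     if isBeautiful(str) == True:
--         return 0
--     else:
--         count = 0
--
--         first = str[0]
--
--         for i in range(1, len(str)):
--             if (i%2 == 0):
--                 if str[i] != first:
--                     count += 1
--             else:
--                 if first == '0':
--                     if str[i] != '1':
--                         count += 1
--                 else:
--                     if str[i] != '0':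
--                         count += 1
--     return count
-- ===== SOURCE B (Python) =====
-- def makeBeautiful(str):
--     if all(a != b for a, b in zip(str, str[1:])):
--         return 0
--     first = str[0]
--     other = '1' if first == '0' else '0'
--     return sum(c != first for c in str[0::2]) + sum(c != other for c in str[1::2])
-- ===== Notes on version B (the rewrite author's own statement) =====
-- stated objective: simpler
-- what changed: Replaced the index/parity-branching for-loop plus the separate index-based isBeautiful scan with a zip-adjacency alternation check and two mismatch sums over the even- and odd-index slices anchored at str[0] and its complement.
import Mathlib
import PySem

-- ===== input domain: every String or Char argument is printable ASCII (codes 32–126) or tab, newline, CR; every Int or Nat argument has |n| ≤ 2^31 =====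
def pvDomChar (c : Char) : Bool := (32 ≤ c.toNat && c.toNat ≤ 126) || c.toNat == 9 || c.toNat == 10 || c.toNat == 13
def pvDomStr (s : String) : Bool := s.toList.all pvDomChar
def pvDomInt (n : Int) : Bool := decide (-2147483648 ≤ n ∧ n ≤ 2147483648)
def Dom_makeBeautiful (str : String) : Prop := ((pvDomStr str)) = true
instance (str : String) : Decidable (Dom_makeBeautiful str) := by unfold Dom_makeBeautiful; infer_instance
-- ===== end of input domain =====

-- B replaces the index/parity loop and separate isBeautiful index scan by a zip-adjacency
-- check and two mismatch sums over the even/odd subsequences (objective: simpler).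

-- ===== PORT A =====
-- for i in range(len(str)-1): if str[i] == str[i+1]: return False ; return True
def isBeautifulA (l : List Char) : Bool :=
  (List.range (l.length - 1)).all fun i => !(l.getD i ' ' == l.getD (i + 1) ' ')

-- the for-loop of makeBeautiful, as structural recursion over the index list range(1, len)
def aloop (l : List Char) (first : Char) : List Nat → Int → Int
  | [], count => count
  | i :: rest, count =>
      aloop l first rest
        (if i % 2 == 0 then
          (if l.getD i ' ' != first then count + 1 else count)
        else
          if first == '0' then
            (if l.getD i ' ' != '1' then count + 1 else count)
          else
            (if l.getD i ' ' != '0' then count + 1 else count))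

def makeBeautiful (str : String) : Int :=
  let l := str.toList
  if isBeautifulA l = true then 0
  else
    let first := l.getD 0 ' '
    aloop l first (List.range' 1 (l.length - 1)) 0

-- ===== PORT B =====
-- s[0::2] / s[1::2]: every other character
def everyOther : List Char → List Char
  | [] => []
  | [c] => [c]
  | c :: _ :: rest => c :: everyOther rest

def makeBeautiful_alt (str : String) : Int :=
  let l := str.toList
  if (l.zip l.tail).all (fun p => p.1 != p.2) then 0
  else
    let first := l.getD 0 ' '
    let other := if first == '0' then '1' else '0'
    ((everyOther l).countP (fun c => c != first) : Int)
      + ((everyOther l.tail).countP (fun c => c != other) : Int)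

-- ===== PRECONDITION & SPEC =====
def Spec_makeBeautiful (str : String) (out : Int) : Prop := out = makeBeautiful_alt str
instance (str : String) (out : Int) : Decidable (Spec_makeBeautiful str out) := by unfold Spec_makeBeautiful; infer_instance

-- ===== CLAIM (what is proved, stated in full; the proofs are below) =====
def Claim_equal_makeBeautiful : Prop := ∀ (str : String), Dom_makeBeautiful str → Spec_makeBeautiful str (makeBeautiful str)

-- ===== LEMMAS AND PROOFS =====

-- positional mismatch count: expected char alternates f, o, f, o, …
def pcount : List Char → Char → Char → Int
  | [], _, _ => 0
  | c :: rest, f, o => (if c ≠ f then 1 else 0) + pcount rest o f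

def otherOf (f : Char) : Char := if f == '0' then '1' else '0'

theorem everyOther_cons (a : Char) (t : List Char) :
    everyOther (a :: t) = a :: everyOther t.tail := by
  cases t <;> simp [everyOther]

theorem bcount_eq (t : List Char) (f o : Char) :
    ((everyOther t).countP (fun c => c != f) : Int)
      + ((everyOther t.tail).countP (fun c => c != o) : Int) = pcount t f o := by
  induction t using everyOther.induct generalizing f o with
  | case1 => simp [everyOther, pcount]
  | case2 c => by_cases hc : c = f <;> simp [everyOther, pcount, hc]
  | case3 c d rest ih =>
      have h2 : everyOther (d :: rest) = d :: everyOther rest.tail := everyOther_cons d rest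
      have H := ih f o
      simp only [everyOther, List.tail_cons, h2, List.countP_cons, pcount]
      by_cases hc : c = f <;> by_cases hd : d = o <;>
        simp [hc, hd] <;> omega

theorem drop_succ_of_drop (L : List Char) (k : Nat) (c : Char) (t : List Char)
    (h : L.drop k = c :: t) : L.drop (k + 1) = t := by
  rw [← List.tail_drop, h, List.tail_cons]

theorem getD_of_drop (L : List Char) (k : Nat) (c : Char) (t : List Char)
    (h : L.drop k = c :: t) : L.getD k ' ' = c := by
  have : L[k]? = some c := by
    have := List.head?_drop (l := L) (i := k)
    rw [h] at this; simpa using this.symm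
  simp [List.getD, this]

theorem aloop_eq (L : List Char) (f : Char) (t : List Char) (k : Nat) (acc : Int)
    (h : L.drop k = t) :
    aloop L f (List.range' k t.length) acc =
      acc + (if k % 2 = 0 then pcount t f (otherOf f) else pcount t (otherOf f) f) := by
  induction t generalizing k acc with
  | nil => simp [aloop, pcount]
  | cons c rest ih =>
      have hk : L.getD k ' ' = c := getD_of_drop L k c rest h
      have hdrop : L.drop (k + 1) = rest := drop_succ_of_drop L k c rest h
      have hrange : List.range' k (c :: rest).length = k :: List.range' (k + 1) rest.length := by
        simp [List.range'_succ]
      rw [hrange]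
      simp only [aloop, hk]
      rw [ih (k + 1) _ hdrop]
      rcases Nat.even_or_odd k with he | ho
      · have h0 : k % 2 = 0 := Nat.even_iff.mp he
        have h1 : (k + 1) % 2 = 1 := by omega
        simp only [h0, h1, pcount, otherOf]
        norm_num
        split_ifs <;> ring
      · have h0 : k % 2 = 1 := Nat.odd_iff.mp ho
        have h1 : (k + 1) % 2 = 0 := by omega
        simp only [h0, h1, pcount, otherOf]
        norm_num
        split_ifs <;> ring

theorem beautiful_eq (t : List Char) (L : List Char) (k : Nat) (h : L.drop k = t) :
    ((List.range' k (t.length - 1)).all fun i => !(L.getD i ' ' == L.getD (i + 1) ' '))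
      = ((t.zip t.tail).all fun p => p.1 != p.2) := by
  induction t generalizing k with
  | nil => simp
  | cons c rest ih =>
      cases rest with
      | nil => simp
      | cons d rest' =>
          have hk : L.getD k ' ' = c := getD_of_drop L k c (d :: rest') h
          have hdrop : L.drop (k + 1) = d :: rest' := drop_succ_of_drop L k c (d :: rest') h
          have hk1 : L.getD (k + 1) ' ' = d := getD_of_drop L (k + 1) d rest' hdrop
          have hlen : (c :: d :: rest').length - 1 = ((d :: rest').length - 1) + 1 := by
            simp
          rw [hlen, List.range'_succ]
          have hih := ih (k + 1) hdrop
          simp only [List.all_cons, hih, hk, hk1]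
          simp only [List.zip, bne]
          rfl

theorem range_all_eq (l : List Char) :
    isBeautifulA l = ((l.zip l.tail).all fun p => p.1 != p.2) := by
  have := beautiful_eq l l 0 (by simp)
  simpa [isBeautifulA, List.range_eq_range'] using this

theorem main_list (l : List Char) :
    (if ((l.zip l.tail).all fun p => p.1 != p.2) = true then (0 : Int)
     else aloop l (l.getD 0 ' ') (List.range' 1 (l.length - 1)) 0)
    = (if ((l.zip l.tail).all fun p => p.1 != p.2) = true then (0 : Int)
       else ((everyOther l).countP (fun c => c != l.getD 0 ' ') : Int)
          + ((everyOther l.tail).countP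
              (fun c => c != (if l.getD 0 ' ' == '0' then '1' else '0')) : Int)) := by
  by_cases hb : ((l.zip l.tail).all fun p => p.1 != p.2) = true
  · simp [hb]
  · simp only [hb, if_false, Bool.false_eq_true]
    cases l with
    | nil => simp at hb
    | cons c rest =>
        simp only [List.getD_cons_zero, List.tail_cons, List.length_cons, Nat.add_sub_cancel]
        rw [aloop_eq (c :: rest) c rest 1 0 (by simp)]
        have hB := bcount_eq (c :: rest) c (if c == '0' then '1' else '0')
        simp only [List.tail_cons] at hB
        rw [hB]
        simp [pcount, otherOf]

-- ===== VERDICT (by name: the statement is the Claim_ definition above) =====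
theorem makeBeautiful_spec : Claim_equal_makeBeautiful := by
  intro str _
  unfold Spec_makeBeautiful makeBeautiful makeBeautiful_alt
  simp only [range_all_eq]
  exact main_list str.toList
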